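-- pv_equiv track=rewrite | github.com/Niha-1704/niha-python-full-stack | problemsolving/slug.py | slug_generator
-- ===== SOURCE A (Python) =====
-- def slug_generator(string):
--     s = string.lower()
--     s =list(s)
--     res = ""
--     for i in range(0,len(s)):
--         if s[i].isalnum():
--             res += s[i]
--         elif s[i] == " ":
--             res += "-"
--         else:
--             continue
--     return res
-- ===== SOURCE B (Python) =====
-- def slug_generator(string):
--     tokens = string.lower().split(" ")
--     return "-".join("".join(c for c in tok if c.isalnum()) for tok in tokens)
-- ===== Notes on version B (the rewrite author's own statement) =====
-- stated objective: alternative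
-- what changed: Replaces A's index loop with a three-branch if chain and string += accumulation by a split-on-space / per-token alnum filter / dash-join pipeline.
import Mathlib
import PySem

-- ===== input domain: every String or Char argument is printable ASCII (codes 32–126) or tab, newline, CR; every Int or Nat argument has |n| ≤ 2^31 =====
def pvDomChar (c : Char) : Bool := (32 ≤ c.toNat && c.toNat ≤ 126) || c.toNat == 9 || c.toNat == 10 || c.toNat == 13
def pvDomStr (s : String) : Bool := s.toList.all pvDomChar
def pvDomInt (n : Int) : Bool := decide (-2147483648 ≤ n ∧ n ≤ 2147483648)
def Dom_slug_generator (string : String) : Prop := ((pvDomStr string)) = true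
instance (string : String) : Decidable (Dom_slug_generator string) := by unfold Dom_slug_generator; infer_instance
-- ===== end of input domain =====

-- B replaces A's per-character if/elif loop by a split-on-space, filter-alnum, join-with-dash pipeline (alternative decomposition, same results).

-- ===== PORT A =====
-- A: lowercases, then iterates the characters in order, appending the char if alnum, '-' if a space, else skipping.
def slug_generator (string : String) : String :=
  let s := (PySem.Str.lower string).toList
  String.ofList (s.foldl (fun res c =>
    if PySem.Chars.isalnum c then res ++ [c]
    else if c == ' ' then res ++ ['-']
    else res) [])

-- ===== PORT B =====
-- B: string.lower().split(" "), keep alnum chars of each token, "-".join.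
def slug_generator_alt (string : String) : String :=
  let toks := PySem.Chars.splitOn (PySem.Str.lower string).toList [' ']
  String.ofList (PySem.Chars.join ['-'] (toks.map (fun t => t.filter PySem.Chars.isalnum)))

-- ===== PRECONDITION & SPEC =====
def Spec_slug_generator (string : String) (out : String) : Prop := out = slug_generator_alt string
instance (string : String) (out : String) : Decidable (Spec_slug_generator string out) := by unfold Spec_slug_generator; infer_instance

-- ===== CLAIM (what is proved, stated in full; the proofs are below) =====
def Claim_equal_slug_generator : Prop := ∀ (string : String), Dom_slug_generator string → Spec_slug_generator string (slug_generator string)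

-- ===== LEMMAS AND PROOFS =====

/-- What A emits for one character. -/
def pvEmit (c : Char) : List Char :=
  if PySem.Chars.isalnum c then [c] else if c == ' ' then ['-'] else []

theorem pvFoldA (cs : List Char) (res : List Char) :
    cs.foldl (fun res c =>
      if PySem.Chars.isalnum c then res ++ [c]
      else if c == ' ' then res ++ ['-']
      else res) res = res ++ cs.flatMap pvEmit := by
  induction cs generalizing res with
  | nil => simp
  | cons c cs ih =>
    simp only [List.foldl_cons, List.flatMap_cons, ih, pvEmit]
    split_ifs <;> simp

/-- Prepend onto the first piece. -/
def pvConsCur (x : List Char) : List (List Char) → List (List Char)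
  | [] => [x]
  | h :: t => (x ++ h) :: t

/-- Split on the single literal space character, CPython semantics. -/
def pvSplit1 : List Char → List (List Char)
  | [] => [[]]
  | c :: cs => if c == ' ' then [] :: pvSplit1 cs else pvConsCur [c] (pvSplit1 cs)

theorem pvSplit1_ne_nil (cs : List Char) : pvSplit1 cs ≠ [] := by
  cases cs with
  | nil => simp [pvSplit1]
  | cons c cs =>
    simp only [pvSplit1]
    split_ifs
    · simp
    · cases h : pvSplit1 cs <;> simp [pvConsCur]

theorem pvConsCur_consCur (x y : List Char) (s : List (List Char)) :
    pvConsCur x (pvConsCur y s) = pvConsCur (x ++ y) s := by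
  cases s <;> simp [pvConsCur]

theorem pvConsCur_nil_of_ne (s : List (List Char)) (h : s ≠ []) : pvConsCur [] s = s := by
  cases s with
  | nil => exact absurd rfl h
  | cons a t => simp [pvConsCur]

theorem pvGo_split (l : List Char) (fuel : Nat) (cur : List Char) (acc : List (List Char))
    (h : l.length < fuel) :
    PySem.Chars.splitOn.go [' '] fuel l cur acc
      = acc.reverse ++ pvConsCur cur.reverse (pvSplit1 l) := by
  induction fuel generalizing l cur acc with
  | zero => omega
  | succ fuel ih =>
    cases l with
    | nil =>
      simp [PySem.Chars.splitOn.go, pvSplit1, pvConsCur]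
    | cons c rest =>
      simp only [PySem.Chars.splitOn.go]
      by_cases hc : c = ' '
      · subst hc
        have hp : List.isPrefixOf [' '] (' ' :: rest) = true := by
          simp [List.isPrefixOf]
        rw [if_pos hp]
        have hd : List.drop [' '].length (' ' :: rest) = rest := by simp
        simp only [List.length_cons] at h
        rw [hd, ih rest [] (cur.reverse :: acc) (Nat.lt_of_succ_lt_succ h)]
        rw [List.reverse_nil, pvConsCur_nil_of_ne _ (pvSplit1_ne_nil rest)]
        simp [pvSplit1, pvConsCur]
      · have hp : List.isPrefixOf [' '] (c :: rest) = false := by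
          simp [List.isPrefixOf]
          exact fun hh => hc hh.symm
        rw [if_neg (by simp [hp])]
        simp only [List.length_cons] at h
        rw [ih _ _ _ (Nat.lt_of_succ_lt_succ h)]
        simp only [pvSplit1, if_neg (by simp [hc] : ¬ (c == ' ') = true)]
        rw [pvConsCur_consCur, List.reverse_cons]

theorem pvSplitOn_eq (cs : List Char) :
    PySem.Chars.splitOn cs [' '] = pvSplit1 cs := by
  unfold PySem.Chars.splitOn
  rw [pvGo_split cs (cs.length + 1) [] [] (Nat.lt_succ_self _)]
  simp [pvConsCur_nil_of_ne _ (pvSplit1_ne_nil cs)]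

theorem pvMain (cs : List Char) :
    cs.flatMap pvEmit
      = PySem.Chars.join ['-'] ((pvSplit1 cs).map (fun t => t.filter PySem.Chars.isalnum)) := by
  induction cs with
  | nil => simp [pvSplit1, PySem.Chars.join, List.intercalate]
  | cons c cs ih =>
    obtain ⟨h, t, hs⟩ : ∃ h t, pvSplit1 cs = h :: t := by
      cases hh : pvSplit1 cs with
      | nil => exact absurd hh (pvSplit1_ne_nil cs)
      | cons a b => exact ⟨a, b, rfl⟩
    by_cases hc : c = ' '
    · subst hc
      have hna : PySem.Chars.isalnum ' ' = false := by decide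
      rw [List.flatMap_cons, ih, hs]
      simp only [pvEmit, hna, Bool.false_eq_true, if_false, beq_self_eq_true, if_true,
        pvSplit1, List.map_cons]
      rw [hs]
      simp [PySem.Chars.join, List.intercalate]
    · have hcb : (c == ' ') = false := by simp [hc]
      by_cases ha : PySem.Chars.isalnum c
      · simp only [List.flatMap_cons, pvEmit, ha, if_true, pvSplit1, hcb, Bool.false_eq_true,
          if_false, hs, pvConsCur, List.map_cons, List.filter_cons, List.singleton_append]
        rw [ih, hs]
        cases t <;> simp [PySem.Chars.join, List.intercalate]
      · simp only [List.flatMap_cons, pvEmit, ha, Bool.false_eq_true, if_false, hcb,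
          pvSplit1, hs, pvConsCur, List.map_cons, List.nil_append]
        rw [ih, hs]
        simp [ha]

-- ===== VERDICT (by name: the statement is the Claim_ definition above) =====
theorem slug_generator_spec : Claim_equal_slug_generator := by
  intro string _
  unfold Spec_slug_generator slug_generator slug_generator_alt
  dsimp only
  rw [pvSplitOn_eq, pvFoldA, pvMain]
  simp
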